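-- pv_equiv track=rewrite | github.com/delectable-worm/recursive-linguistics | main.py | arbitraryText
-- ===== SOURCE A (Python) =====
-- def arbitraryText(n, Output, rules): #don't go too high w/ recursion
--   i = 0 #counter
--   if i == n: #n iterations reacher
--     return Output
--   else:
--     outBuffer = ""
--     for char in range(0,len(Output),2):
--       char = Output[char] + Output[char+1] #get the character
--       if char in rules.keys(): #get transformation
--         outBuffer = outBuffer + rules[char] #replce
--       else:
--         outBuffer = outBuffer + char #retain
--     return arbitraryText(n-1, outBuffer, rules) #!!! MUst return
-- ===== SOURCE B (Python) =====
-- def arbitraryText(n, Output, rules):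
--     current = Output
--     for _ in range(n):
--         chunks = [current[i:i + 2] for i in range(0, len(current), 2)]
--         current = "".join(rules.get(p, p) for p in chunks)
--     return current
-- ===== Notes on version B (the rewrite author's own statement) =====
-- stated objective: simpler
-- what changed: Replaced A's counted recursion with indexed char+char string concatenation by an iterative for-range loop that slices the string into 2-char chunks and joins dict.get lookups of the chunks.
-- outside the precondition, e.g. on arbitraryText(2, 'abab', {'cd': 'x'}): A returns 'abab', B returns 'abab'
import Mathlib
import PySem

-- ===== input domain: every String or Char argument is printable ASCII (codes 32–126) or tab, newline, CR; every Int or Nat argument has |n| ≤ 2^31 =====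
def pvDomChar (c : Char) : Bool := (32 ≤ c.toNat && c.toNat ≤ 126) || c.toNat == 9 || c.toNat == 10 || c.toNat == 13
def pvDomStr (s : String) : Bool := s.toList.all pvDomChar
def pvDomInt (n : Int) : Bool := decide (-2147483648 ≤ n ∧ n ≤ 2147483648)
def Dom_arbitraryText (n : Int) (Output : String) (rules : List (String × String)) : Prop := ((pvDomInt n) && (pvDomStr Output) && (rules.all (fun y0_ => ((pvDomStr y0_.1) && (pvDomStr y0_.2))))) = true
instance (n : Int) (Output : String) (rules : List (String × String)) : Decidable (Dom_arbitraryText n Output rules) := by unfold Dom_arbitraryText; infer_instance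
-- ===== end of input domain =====

-- B replaces A's counted recursion with indexed char+char accumulation by an iterative for-range
-- loop whose pass slices the string into 2-char chunks and joins dict.get lookups (objective: simpler).

-- ===== PORT A =====
-- one pass of A's for-loop: outBuffer += rules[char] on a key hit (first match), else += the pair
def pvStepA (cs : List Char) (rules : List (String × String)) : List Char :=
  (PySem.List.pyRange 0 (PySem.List.len cs) 2).foldl
    (fun outBuffer i =>
      match rules.find? (fun r => r.1.toList == [PySem.List.pyGetD cs i ' ', PySem.List.pyGetD cs (i + 1) ' ']) with
      | some r => outBuffer ++ r.2.toList
      | none => outBuffer ++ [PySem.List.pyGetD cs i ' ', PySem.List.pyGetD cs (i + 1) ' ']) []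

-- A's recursion arbitraryText(n-1, outBuffer, rules); fuel = n.toNat (Python A diverges for n < 0)
def pvRecA : Nat → List Char → List (String × String) → List Char
  | 0, cs, _ => cs
  | f + 1, cs, rules => pvRecA f (pvStepA cs rules) rules

def arbitraryText (n : Int) (Output : String) (rules : List (String × String)) : String :=
  String.ofList (pvRecA n.toNat Output.toList rules)

-- ===== PORT B =====
-- B's pass: chunks = [current[i:i+2] …]; "".join(rules.get(p, p) for p in chunks)
def pvPassB (cs : List Char) (rules : List (String × String)) : List Char :=
  let chunks := (PySem.List.pyRange 0 (PySem.List.len cs) 2).map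
    (fun i => PySem.List.slice cs (some i) (some (i + 2)))
  (chunks.map (fun p =>
    ((PySem.Dict.mk rules).getD (String.ofList p) (String.ofList p)).toList)).flatten

-- B's 'for _ in range(n): current = …' (empty range for n ≤ 0, as in Python)
def arbitraryText_alt (n : Int) (Output : String) (rules : List (String × String)) : String :=
  String.ofList ((PySem.List.pyRange 0 n 1).foldl
    (fun current _ => pvPassB current rules) Output.toList)

-- ===== PRECONDITION & SPEC =====
-- Pre_ restricts to the natural domain of the 2-char pair-rewriting task: n ≥ 0 (A never returns
-- for negative n), and unless n = 0 an even-length Output (A raises IndexError on Output[char+1]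
-- otherwise) with, when several passes run (n ≥ 2), even-length replacements so every intermediate
-- string stays pair-aligned; this excludes some inputs where an odd-length replacement happens
-- never to fire and A still returns — there B agrees with A (see cites).
def Pre_arbitraryText (n : Int) (Output : String) (rules : List (String × String)) : Prop :=
  0 ≤ n ∧ (n = 0 ∨ (Output.toList.length % 2 = 0 ∧
    (n = 1 ∨ ∀ r ∈ rules, r.2.toList.length % 2 = 0)))
instance (n : Int) (Output : String) (rules : List (String × String)) : Decidable (Pre_arbitraryText n Output rules) := by unfold Pre_arbitraryText; infer_instance

def pvWitness_arbitraryText : Int × String × (List (String × String)) := (2, "abcd", [("ab", "xy")])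

def Spec_arbitraryText (n : Int) (Output : String) (rules : List (String × String)) (out : String) : Prop := out = arbitraryText_alt n Output rules
instance (n : Int) (Output : String) (rules : List (String × String)) (out : String) : Decidable (Spec_arbitraryText n Output rules out) := by unfold Spec_arbitraryText; infer_instance

-- ===== CLAIM (what is proved, stated in full; the proofs are below) =====
def Claim_equal_arbitraryText : Prop := ∀ (n : Int) (Output : String) (rules : List (String × String)), Dom_arbitraryText n Output rules → Pre_arbitraryText n Output rules → Spec_arbitraryText n Output rules (arbitraryText n Output rules)
-- ===== LEMMAS AND PROOFS =====

-- B's dict.get(p, p) on the assoc list is A's first-match find?, read back as a char list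
theorem pvLookup_eq (rules : List (String × String)) (c : List Char) :
    ((PySem.Dict.mk rules).getD (String.ofList c) (String.ofList c)).toList
      = (match rules.find? (fun r => r.1.toList == c) with
         | some r => r.2.toList
         | none => c) := by
  induction rules with
  | nil => simp [PySem.Dict.getD_eq_get?_getD, PySem.Dict.get?, List.find?]
  | cons r rest ih =>
      rw [PySem.Dict.getD_eq_get?_getD, PySem.Dict.get?_mk_cons]
      by_cases h : r.1.toList = c
      · have hk : (r.1 == String.ofList c) = true := by simp [String.ext_iff, h]
        rw [List.find?_cons_of_pos (p := fun q : String × String => q.1.toList == c) (by simpa using h)]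
        simp [hk]
      · have hk : (r.1 == String.ofList c) = false := by
          simp only [beq_eq_false_iff_ne, ne_eq, String.ext_iff]
          simpa using h
        rw [List.find?_cons_of_neg (p := fun q : String × String => q.1.toList == c) (by simpa using h), hk]
        simp only [Bool.false_eq_true, if_false]
        rw [← PySem.Dict.getD_eq_get?_getD]
        exact ih

-- on an even-length string each index of A's range carries a full 2-char chunk
theorem pvChunk_eq (cs : List Char) (h : cs.length % 2 = 0) (i : Int)
    (hi : i ∈ PySem.List.pyRange 0 (PySem.List.len cs) 2) :
    PySem.List.slice cs (some i) (some (i + 2))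
      = [PySem.List.pyGetD cs i ' ', PySem.List.pyGetD cs (i + 1) ' '] := by
  rw [PySem.List.mem_pyRange_iff_of_pos (by norm_num)] at hi
  obtain ⟨h0, hlt, hdvd⟩ := hi
  have hlen : PySem.List.len cs = (cs.length : Int) := by simp [pysem]
  rw [hlen] at hlt
  have hm1 : i.toNat + 1 < cs.length := by omega
  rw [PySem.List.pyGetD_eq_getElem cs ' ' h0 (by omega),
      PySem.List.pyGetD_eq_getElem cs ' ' (by omega) (by omega),
      PySem.List.slice_toNat cs h0 (by omega)]
  rw [show (i + 2).toNat - i.toNat = 2 from by omega]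
  simp only [show (i + 1).toNat = i.toNat + 1 from by omega]
  rw [List.drop_eq_getElem_cons (by omega : i.toNat < cs.length),
      List.drop_eq_getElem_cons (by omega : i.toNat + 1 < cs.length),
      List.take_succ_cons, List.take_succ_cons, List.take_zero]

-- on an even-length string A's pass and B's pass agree chunk by chunk
theorem pvPass_eq (cs : List Char) (rules : List (String × String))
    (h : cs.length % 2 = 0) : pvStepA cs rules = pvPassB cs rules := by
  unfold pvStepA pvPassB
  have hbody : (fun (outBuffer : List Char) (i : Int) =>
      match rules.find? (fun r => r.1.toList == [PySem.List.pyGetD cs i ' ', PySem.List.pyGetD cs (i + 1) ' ']) with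
      | some r => outBuffer ++ r.2.toList
      | none => outBuffer ++ [PySem.List.pyGetD cs i ' ', PySem.List.pyGetD cs (i + 1) ' ']) =
      (fun (outBuffer : List Char) (i : Int) => outBuffer ++
        (match rules.find? (fun r => r.1.toList == [PySem.List.pyGetD cs i ' ', PySem.List.pyGetD cs (i + 1) ' ']) with
         | some r => r.2.toList
         | none => [PySem.List.pyGetD cs i ' ', PySem.List.pyGetD cs (i + 1) ' '])) := by
    funext o i
    cases hf : rules.find? (fun r => r.1.toList == [PySem.List.pyGetD cs i ' ', PySem.List.pyGetD cs (i + 1) ' ']) <;> rfl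
  rw [hbody, PySem.List.foldl_append_eq_flatMap]
  simp only [List.nil_append, List.flatMap_def, List.map_map]
  congr 1
  apply List.map_congr_left
  intro i hi
  simp only [Function.comp]
  rw [pvChunk_eq cs h i hi, pvLookup_eq]

-- with even-length replacements B's pass preserves even length
theorem pvFlatten_even (l : List (List Char)) (h : ∀ x ∈ l, x.length % 2 = 0) :
    l.flatten.length % 2 = 0 := by
  induction l with
  | nil => rfl
  | cons a t ih =>
      have := h a (by simp)
      have := ih (fun x hx => h x (by simp [hx]))
      simp only [List.flatten_cons, List.length_append]
      omega

theorem pvPassB_even (cs : List Char) (rules : List (String × String))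
    (hr : ∀ r ∈ rules, r.2.toList.length % 2 = 0) (h : cs.length % 2 = 0) :
    (pvPassB cs rules).length % 2 = 0 := by
  unfold pvPassB
  apply pvFlatten_even
  intro x hx
  simp only [List.mem_map] at hx
  obtain ⟨p, hp, rfl⟩ := hx
  obtain ⟨i, hi, rfl⟩ := hp
  rw [pvChunk_eq cs h i hi, pvLookup_eq]
  cases hf : rules.find? (fun r => r.1.toList == [PySem.List.pyGetD cs i ' ', PySem.List.pyGetD cs (i + 1) ' ']) with
  | none => simp
  | some r => exact hr r (List.mem_of_find?_eq_some hf)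

theorem pvFoldl_const (l : List Int) (g : List Char → List Char) (cs : List Char) :
    l.foldl (fun c _ => g c) cs = g^[l.length] cs := by
  induction l generalizing cs with
  | nil => rfl
  | cons a t ih => simpa [List.foldl, Function.iterate_succ_apply] using ih (g cs)

theorem pvRecA_iter (f : Nat) (cs : List Char) (rules : List (String × String)) :
    pvRecA f cs rules = (fun c => pvStepA c rules)^[f] cs := by
  induction f generalizing cs with
  | zero => rfl
  | succ f ih => simp [pvRecA, ih, Function.iterate_succ_apply]

theorem pvIter_eq (rules : List (String × String))
    (hr : ∀ r ∈ rules, r.2.toList.length % 2 = 0) :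
    ∀ (f : Nat) (cs : List Char), cs.length % 2 = 0 →
      (fun c => pvStepA c rules)^[f] cs = (fun c => pvPassB c rules)^[f] cs := by
  intro f
  induction f with
  | zero => intro cs _; rfl
  | succ f ih =>
      intro cs h
      rw [Function.iterate_succ_apply, Function.iterate_succ_apply]
      simp only [pvPass_eq cs rules h]
      exact ih _ (pvPassB_even cs rules hr h)

-- ===== VERDICT (by name: the statements are the Claim_ definitions above) =====
theorem arbitraryText_spec : Claim_equal_arbitraryText := by
  intro n Output rules _ hPre
  obtain ⟨hn, hcase⟩ := hPre
  unfold Spec_arbitraryText arbitraryText arbitraryText_alt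
  rw [pvFoldl_const, PySem.List.length_pyRange_one, pvRecA_iter]
  rcases hcase with h0 | ⟨heven, h1⟩
  · subst h0; rfl
  · rcases h1 with h1 | hall
    · subst h1
      norm_num [Function.iterate_one, pvPass_eq _ rules heven]
    · have := pvIter_eq rules hall n.toNat Output.toList heven
      simp [this]
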